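-- pv_equiv track=rewrite | github.com/mushahiroyuki/python-pro | ch02/08group/groups2.py | join_names
-- ===== SOURCE A (Python) =====
-- def join_names(names):  # 名前を合体（join）してひとつの文字列にする
--     name_string = ''
--     for index, name in enumerate(names):
--         if index > 0:
--             name_string += 'に'
--         if index == len(names) -1:
--             name_string += '、それから'
--         name_string += name
--     return name_string
-- ===== SOURCE B (Python) =====
-- def join_names(names):
--     if not names:
--         return ''
--     return 'に'.join(names[:-1] + ['、それから' + names[-1]])
-- ===== Notes on version B (the rewrite author's own statement) =====
-- stated objective: idiomatic
-- what changed: Replaces the index-tracking loop with per-element branch tests and repeated string concatenation by splitting the last name off once and emitting all separators with a single str.join.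
import Mathlib
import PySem

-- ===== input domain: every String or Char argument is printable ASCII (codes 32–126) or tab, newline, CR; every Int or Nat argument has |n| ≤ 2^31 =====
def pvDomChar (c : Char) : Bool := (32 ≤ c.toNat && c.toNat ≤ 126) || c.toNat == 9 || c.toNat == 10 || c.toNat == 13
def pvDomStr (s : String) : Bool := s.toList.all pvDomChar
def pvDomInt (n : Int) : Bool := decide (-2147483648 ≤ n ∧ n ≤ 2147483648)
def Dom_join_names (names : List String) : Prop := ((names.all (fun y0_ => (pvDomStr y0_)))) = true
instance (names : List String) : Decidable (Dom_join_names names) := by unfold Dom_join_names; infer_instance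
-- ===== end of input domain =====

-- B replaces A's index-tracking loop by splitting off the last name and one 'に'.join; return values proved equal on all inputs.

-- ===== PORT A =====
-- loop body of A's for-loop (name_string is the accumulator, p = (index, name))
def pvStepA (n : Int) (name_string : String) (p : Int × String) : String :=
  let name_string := if p.1 > 0 then name_string ++ "に" else name_string
  let name_string := if p.1 = n - 1 then name_string ++ "、それから" else name_string
  name_string ++ p.2

def join_names (names : List String) : String :=
  (PySem.List.enumerate names).foldl (pvStepA (names.length : Int)) ""

-- ===== PORT B =====
def join_names_alt (names : List String) : String :=
  if names = [] then ""
  else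
    PySem.Str.join "に"
      (PySem.List.slice names none (some (-1)) ++
        ["、それから" ++ PySem.List.pyGetD names (-1) ""])

-- ===== PRECONDITION & SPEC =====
def Spec_join_names (names : List String) (out : String) : Prop := out = join_names_alt names
instance (names : List String) (out : String) : Decidable (Spec_join_names names out) := by unfold Spec_join_names; infer_instance

-- ===== CLAIM (what is proved, stated in full; the proofs are below) =====
def Claim_equal_join_names : Prop := ∀ (names : List String), Dom_join_names names → Spec_join_names names (join_names names)

-- ===== LEMMAS AND PROOFS =====

-- canonical recursive form both ports are reduced to
def pvCanon : List String → String
  | [] => ""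
  | [x] => "、それから" ++ x
  | x :: y :: r => x ++ "に" ++ pvCanon (y :: r)

theorem pvB_eq_canon (names : List String) : join_names_alt names = pvCanon names := by
  induction names with
  | nil => rfl
  | cons x rest ih =>
    cases rest with
    | nil =>
      apply String.toList_inj.mp
      rw [join_names_alt, if_neg (by simp : ¬([x] : List String) = []), PySem.List.slice_to_neg_one,
        PySem.List.pyGetD_neg_one (xs := [x]) (d := "") (by simp)]
      simp [pvCanon, PySem.Str.toList_join, PySem.Chars.join_singleton]
    | cons y r =>
      apply String.toList_inj.mp
      have hlast : PySem.List.pyGetD (x :: y :: r) (-1) "" = PySem.List.pyGetD (y :: r) (-1) "" := by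
        simp [PySem.List.pyGetD_neg_one (xs := x :: y :: r) (d := "") (by simp),
          PySem.List.pyGetD_neg_one (xs := y :: r) (d := "") (by simp), List.getLast]
      have hx : (x :: y :: r : List String) ≠ [] := by simp
      have hy : (y :: r : List String) ≠ [] := by simp
      simp only [join_names_alt, if_neg hx, if_neg hy, PySem.List.slice_to_neg_one] at ih ⊢
      rw [hlast, show (x :: y :: r).dropLast = x :: (y :: r).dropLast from rfl]
      -- the tail list is nonempty: expose its head to use join_cons_cons
      obtain ⟨b, l, hbl⟩ := List.exists_cons_of_ne_nil
        (show (y :: r).dropLast ++ ["、それから" ++ PySem.List.pyGetD (y :: r) (-1) ""] ≠ [] by simp)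
      rw [show pvCanon (x :: y :: r) = x ++ "に" ++ pvCanon (y :: r) from rfl, List.cons_append, hbl]
      simp only [PySem.Str.toList_join, List.map_cons] at ih ⊢
      rw [PySem.Chars.join_cons_cons,
        show b.toList :: List.map String.toList l = List.map String.toList (b :: l) from rfl,
        ← PySem.Str.toList_join, ← hbl, ih]
      simp

theorem pvA_fold (xs : List String) (hx : xs ≠ []) (s : Nat) (hs : 1 ≤ s) (n : Int)
    (hn : n = s + xs.length) (acc : String) :
    (PySem.List.enumerate xs (s : Int)).foldl (pvStepA n) acc = acc ++ "に" ++ pvCanon xs := by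
  induction xs generalizing s acc with
  | nil => exact absurd rfl hx
  | cons x rest ih =>
    rw [PySem.List.enumerate_cons]
    cases rest with
    | nil =>
      simp only [List.length_cons, List.length_nil] at hn
      simp only [PySem.List.enumerate_nil, List.foldl_cons, List.foldl_nil, pvStepA]
      rw [if_pos (by omega : (s : Int) > 0), if_pos (by omega : (s : Int) = n - 1)]
      rw [show pvCanon [x] = "、それから" ++ x from rfl, ← String.append_assoc]
    | cons y r =>
      have hn' : n = (s : Int) + (r.length + 2) := by
        simp only [List.length_cons] at hn; push_cast at hn ⊢; omega
      simp only [List.foldl_cons, pvStepA]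
      rw [if_pos (by omega : (s : Int) > 0), if_neg (by omega : ¬((s : Int) = n - 1))]
      rw [show ((s : Int) + 1) = ((s + 1 : Nat) : Int) by push_cast; ring]
      rw [ih (by simp) (s + 1) (by omega)
        (by simp only [List.length_cons]; push_cast; omega) _]
      rw [show pvCanon (x :: y :: r) = x ++ "に" ++ pvCanon (y :: r) from rfl]
      simp [String.append_assoc]

theorem pvA_eq_canon (names : List String) : join_names names = pvCanon names := by
  cases names with
  | nil => rfl
  | cons x rest =>
    unfold join_names
    simp only [PySem.List.enumerate_cons]
    cases rest with
    | nil =>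
      simp only [PySem.List.enumerate_nil, List.foldl_cons, List.foldl_nil, pvStepA]
      rw [if_neg (by omega : ¬((0 : Int) > 0)),
        if_pos (by simp : (0 : Int) = ((([x] : List String).length : Int)) - 1)]
      rw [show pvCanon [x] = "、それから" ++ x from rfl]
      simp
    | cons y r =>
      simp only [List.foldl_cons, pvStepA]
      rw [if_neg (by omega : ¬((0 : Int) > 0)),
        if_neg (by simp only [List.length_cons]; push_cast; omega :
          ¬((0 : Int) = (((x :: y :: r : List String).length : Int)) - 1))]
      rw [show ((0 : Int) + 1) = ((1 : Nat) : Int) by norm_num]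
      rw [pvA_fold (y :: r) (by simp) 1 (by omega) _
        (by simp only [List.length_cons]; push_cast; omega) _]
      rw [show pvCanon (x :: y :: r) = x ++ "に" ++ pvCanon (y :: r) from rfl]
      simp [String.append_assoc]

-- ===== VERDICT (by name: the statement is the Claim_ definition above) =====
theorem join_names_spec : Claim_equal_join_names := by
  intro names _
  unfold Spec_join_names
  rw [pvA_eq_canon, pvB_eq_canon]
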